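-- pv_equiv track=rewrite | github.com/mmsl8244-ops/DX | database_service.py | _detect_name_col
-- ===== SOURCE A (Python) =====
-- def _detect_name_col(rows: list[list[str]], name_to_pid: dict) -> int:
--     if not rows: return 0
--     names = set(name_to_pid.keys())
--     best_col, best_hits = 0, -1
--     col_count = max(len(r) for r in rows) if rows else 0
--     for c in range(col_count):
--         hits = sum(1 for r in rows if c < len(r) and (r[c] or "").strip() in names)
--         if hits > best_hits:
--             best_hits, best_col = hits, c
--     return best_col
-- ===== SOURCE B (Python) =====
-- def _detect_name_col(rows: list[list[str]], name_to_pid: dict) -> int: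
--     if not rows:
--         return 0
--     names = set(name_to_pid)
--     col_count = max(map(len, rows))
--     if col_count == 0:
--         return 0
--     counts = [0] * col_count
--     for r in rows:
--         for c, v in enumerate(r):
--             if v.strip() in names:
--                 counts[c] += 1
--     return counts.index(max(counts))
-- ===== Notes on version B (the rewrite author's own statement) =====
-- stated objective: alternative
-- what changed: A rescans all rows once per column index (sum per column, running best tracker); B makes a single pass over the cells building a dense per-column hit-count list, then returns counts.index(max(counts)).
import Mathlib
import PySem

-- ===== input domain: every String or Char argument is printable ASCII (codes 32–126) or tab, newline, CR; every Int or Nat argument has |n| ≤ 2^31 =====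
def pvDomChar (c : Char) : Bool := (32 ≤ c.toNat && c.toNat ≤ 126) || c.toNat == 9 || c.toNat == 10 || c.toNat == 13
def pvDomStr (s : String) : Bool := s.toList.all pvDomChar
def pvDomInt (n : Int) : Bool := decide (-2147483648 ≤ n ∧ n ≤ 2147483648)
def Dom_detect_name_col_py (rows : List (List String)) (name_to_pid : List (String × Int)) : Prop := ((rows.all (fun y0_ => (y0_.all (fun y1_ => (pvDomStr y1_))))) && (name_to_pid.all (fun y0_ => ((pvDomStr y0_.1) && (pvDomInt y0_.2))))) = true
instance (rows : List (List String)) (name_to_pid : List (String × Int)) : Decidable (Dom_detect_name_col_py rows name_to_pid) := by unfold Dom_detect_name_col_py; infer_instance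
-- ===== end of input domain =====

-- B replaces A's per-column rescan of all rows by one pass over the cells that fills a
-- dense per-column hit-count list and then takes counts.index(max(counts)); same result.

-- ===== PORT A =====
-- helper shared by both ports: max(len(r) for r in rows) / max(map(len, rows)) —
-- Python's max over the lengths (only reached with rows nonempty; getD 0 is the dead empty case)
def pvMaxLen (rows : List (List String)) : Int :=
  (PySem.List.max? (rows.map (fun r => (r.length : Int))) (fun y => y)).getD 0

def detect_name_col_py (rows : List (List String)) (name_to_pid : List (String × Int)) : Int :=
  if rows = [] then 0 else
  let names : PySem.Set String := PySem.Set.ofList (name_to_pid.map Prod.fst)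
  let col_count : Int := if rows = [] then 0 else pvMaxLen rows
  -- for c in range(col_count): hits = sum(1 for r in rows if c < len(r) and (r[c] or "").strip() in names)
  (((PySem.List.pyRange 0 col_count 1).foldl (fun (st : Int × Int) c =>
      let hits : Int := rows.foldl (fun acc r =>
        if c < (r.length : Int) ∧
           (PySem.Set.contains names (PySem.Str.strip
             (let v := PySem.List.pyGetD r c ""; if v = "" then "" else v)) = true)
        then acc + 1 else acc) 0
      if hits > st.2 then (c, hits) else st) ((0 : Int), (-1 : Int))).1)

-- ===== PORT B =====
def detect_name_col_py_alt (rows : List (List String)) (name_to_pid : List (String × Int)) : Int :=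
  if rows = [] then 0 else
  let names : PySem.Set String := PySem.Set.ofList (name_to_pid.map Prod.fst)
  let col_count : Int := pvMaxLen rows
  if col_count = 0 then 0 else
  -- single pass: counts[c] += 1 for every cell (c, v) of every row with v.strip() in names
  let counts : List Int := rows.foldl (fun counts r =>
      (PySem.List.enumerate r).foldl (fun counts cv =>
        if PySem.Set.contains names (PySem.Str.strip cv.2) then
          counts.modify cv.1.toNat (· + 1) else counts) counts)
    (List.replicate col_count.toNat (0 : Int))
  -- counts.index(max(counts)); counts is nonempty and max(counts) ∈ counts, so neither call raises
  match PySem.List.max? counts (fun y => y) with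
  | some m => ((PySem.List.index? counts m).getD 0 : Int)
  | none => 0

-- ===== PRECONDITION & SPEC =====
def Spec_detect_name_col_py (rows : List (List String)) (name_to_pid : List (String × Int)) (out : Int) : Prop := out = detect_name_col_py_alt rows name_to_pid
instance (rows : List (List String)) (name_to_pid : List (String × Int)) (out : Int) : Decidable (Spec_detect_name_col_py rows name_to_pid out) := by unfold Spec_detect_name_col_py; infer_instance

-- ===== CLAIM (what is proved, stated in full; the proofs are below) =====
def Claim_equal_detect_name_col_py : Prop := ∀ (rows : List (List String)) (name_to_pid : List (String × Int)), Dom_detect_name_col_py rows name_to_pid → Spec_detect_name_col_py rows name_to_pid (detect_name_col_py rows name_to_pid)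

-- ===== LEMMAS AND PROOFS =====

-- cell test shared by the two programs: v.strip() in names
def pvCond (names : PySem.Set String) (v : String) : Bool :=
  PySem.Set.contains names (PySem.Str.strip v)

-- "row r has a hit in column k"
def pvHitAt (names : PySem.Set String) (r : List String) (k : Nat) : Bool :=
  match r[k]? with
  | some v => pvCond names v
  | none => false

-- B's inner loop over one row, pointwise on the counts list
lemma pv_inner_getElem? (names : PySem.Set String) :
    ∀ (r : List String) (s : Nat) (cl : List Int) (k : Nat),
    ((PySem.List.enumerate r (s : Int)).foldl (fun counts cv =>
        if PySem.Set.contains names (PySem.Str.strip cv.2) then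
          counts.modify cv.1.toNat (· + 1) else counts) cl)[k]?
    = if s ≤ k ∧ pvHitAt names r (k - s) then cl[k]?.map (· + 1) else cl[k]? := by
  intro r
  induction r with
  | nil => intro s cl k; simp [PySem.List.enumerate, pvHitAt]
  | cons v r ih =>
    intro s cl k
    rw [PySem.List.enumerate_cons]
    have hs1 : (s : Int) + 1 = ((s + 1 : Nat) : Int) := by push_cast; ring
    rw [List.foldl_cons, hs1, ih]
    have hcl : ∀ j : Nat, ((if PySem.Set.contains names (PySem.Str.strip v) = true
          then cl.modify ((s : Int)).toNat (· + 1) else cl))[j]?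
        = if pvCond names v = true ∧ j = s then cl[j]?.map (· + 1) else cl[j]? := by
      intro j
      by_cases hc : PySem.Set.contains names (PySem.Str.strip v) = true
      · rw [if_pos hc]
        by_cases hj : j = s
        · subst hj
          simp only [List.getElem?_modify, Int.toNat_natCast, pvCond, hc, true_and]
          cases cl[j]? <;> simp
        · simp only [List.getElem?_modify, Int.toNat_natCast, pvCond, hc, true_and, hj,
            if_false, if_neg (Ne.symm hj)]
          cases cl[j]? <;> simp
      · rw [if_neg hc]
        simp only [pvCond, hc]
        simp
    rcases Nat.lt_trichotomy k s with hk | hk | hk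
    · rw [if_neg (by omega), hcl, if_neg (by simp; omega), if_neg (by omega)]
    · subst hk
      rw [if_neg (by omega), hcl]
      have hhit : pvHitAt names (v :: r) (k - k) = pvCond names v := by
        simp [pvHitAt]
      rw [hhit]
      by_cases hcv : pvCond names v = true
      · rw [if_pos ⟨hcv, rfl⟩, if_pos ⟨by omega, hcv⟩]
      · rw [if_neg (by simp [hcv]), if_neg (by simp [hcv])]
    · have hsub : k - s = (k - (s + 1)) + 1 := by omega
      have hhit : pvHitAt names (v :: r) (k - s) = pvHitAt names r (k - (s + 1)) := by
        rw [hsub]; simp [pvHitAt]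
      by_cases hh : pvHitAt names r (k - (s + 1)) = true
      · rw [if_pos ⟨by omega, hh⟩, hcl, if_neg (by simp; omega),
          if_pos ⟨by omega, by rw [hhit]; exact hh⟩]
      · rw [if_neg (by simp [hh]), hcl, if_neg (by simp; omega),
          if_neg (by rw [hhit]; simp [hh])]

-- B's outer loop over all rows, pointwise on the counts list
lemma pv_outer_getElem? (names : PySem.Set String) :
    ∀ (rows : List (List String)) (cl : List Int) (k : Nat),
    ((rows.foldl (fun counts r =>
        (PySem.List.enumerate r).foldl (fun counts cv =>
          if PySem.Set.contains names (PySem.Str.strip cv.2) then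
            counts.modify cv.1.toNat (· + 1) else counts) counts) cl))[k]?
    = cl[k]?.map (· + (rows.countP (fun r => pvHitAt names r k) : Int)) := by
  intro rows
  induction rows with
  | nil => intro cl k; cases h : cl[k]? <;> simp [h]
  | cons r rows ih =>
    intro cl k
    rw [List.foldl_cons, ih]
    have h0 : PySem.List.enumerate r = PySem.List.enumerate r ((0 : Nat) : Int) := by norm_num
    rw [h0, pv_inner_getElem? names r 0 cl k]
    rw [List.countP_cons]
    by_cases hh : pvHitAt names r k = true
    · simp only [Nat.zero_le, true_and, Nat.sub_zero, hh, if_true]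
      cases cl[k]? <;> simp [add_assoc, add_comm]
    · simp only [Nat.zero_le, true_and, Nat.sub_zero, hh]
      cases cl[k]? <;> simp

-- A's range loop is a first-argmax scan: characterisation of the fold
lemma pv_argmax_fold :
    ∀ (l : List Int) (s bc bh : Int),
    (PySem.List.enumerate l s).foldl (fun st cv => if cv.2 > st.2 then cv else st) (bc, bh)
    = if l.foldl max bh > bh
      then (s + (((PySem.List.index? l (l.foldl max bh)).getD 0 : Nat) : Int), l.foldl max bh)
      else (bc, bh) := by
  intro l
  induction l with
  | nil => intro s bc bh; simp [PySem.List.enumerate]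
  | cons x t ih =>
    intro s bc bh
    rw [PySem.List.enumerate_cons, List.foldl_cons, List.foldl_cons]
    by_cases hx : x > bh
    · simp only [hx, if_true]
      rw [ih]
      have hmax : max bh x = x := by omega
      rw [hmax]
      set M := t.foldl max x with hM
      have hxM : x ≤ M := (PySem.List.le_foldl_max t x).1
      have hMbh : M > bh := by omega
      by_cases hMx : M > x
      · have hxne : x ≠ M := by omega
        have hmemM : M ∈ t := by
          rcases PySem.List.foldl_max_mem t x with h | h
          · omega
          · exact h
        obtain ⟨j, hj⟩ : ∃ j, PySem.List.index? t M = some j := by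
          cases h : PySem.List.index? t M with
          | none => exact absurd ((PySem.List.index?_eq_none_iff t M).mp h) (by simp [hmemM])
          | some j => exact ⟨j, rfl⟩
        rw [PySem.List.index?_cons_of_ne t hxne]
        simp only [hMx, if_true, hMbh, if_true, hj, Option.map_some, Option.getD_some]
        congr 1
        push_cast; ring
      · have hMeq : M = x := by omega
        rw [if_neg hMx, if_pos hMbh, hMeq, PySem.List.index?_cons_self]
        simp
    · simp only [hx, if_false]
      rw [ih]
      have hmax : max bh x = bh := by omega
      rw [hmax]
      set M := t.foldl max bh with hM
      by_cases hMb : M > bh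
      · have hxne : x ≠ M := by omega
        have hmemM : M ∈ t := by
          rcases PySem.List.foldl_max_mem t bh with h | h
          · omega
          · exact h
        obtain ⟨j, hj⟩ : ∃ j, PySem.List.index? t M = some j := by
          cases h : PySem.List.index? t M with
          | none => exact absurd ((PySem.List.index?_eq_none_iff t M).mp h) (by simp [hmemM])
          | some j => exact ⟨j, rfl⟩
        rw [PySem.List.index?_cons_of_ne t hxne]
        simp only [hMb, if_true, hj, Option.map_some, Option.getD_some]
        congr 1
        push_cast; ring
      · simp [hMb]

-- A's fold over range(n) as the enumerate fold over the list of hit counts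
lemma pv_range_fold_eq (H : Int → Int) (n : Nat) (init : Int × Int) :
    (PySem.List.pyRange 0 (n : Int) 1).foldl
      (fun (st : Int × Int) c => if H c > st.2 then (c, H c) else st) init
    = (PySem.List.enumerate ((PySem.List.pyRange 0 (n : Int) 1).map H) 0).foldl
      (fun st cv => if cv.2 > st.2 then cv else st) init := by
  rw [PySem.List.enumerate_eq_map_pyRange _ 0]
  have hlen : PySem.List.len ((PySem.List.pyRange 0 (n : Int) 1).map H) = (n : Int) := by
    simp [PySem.List.len, PySem.List.length_pyRange_one]
  rw [hlen, List.foldl_map]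
  apply PySem.List.foldl_congr_mem
  intro acc c hc
  have hc' := PySem.List.mem_pyRange_one.mp hc
  rw [PySem.List.pyGetD_map_pyRange_of_nonneg H _ _ _ hc'.1 hc'.2]

-- (v or "") on strings is v itself: "" is the only falsy string and "" or "" == ""
lemma pv_or_empty (v : String) : (if v = "" then "" else v) = v := by
  by_cases h : v = ""
  · rw [if_pos h, h]
  · rw [if_neg h]

-- ===== VERDICT (by name: the statement is the Claim_ definition above) =====
theorem detect_name_col_py_spec : Claim_equal_detect_name_col_py := by
  intro rows ntp _
  unfold Spec_detect_name_col_py detect_name_col_py detect_name_col_py_alt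
  by_cases hrows : rows = []
  · simp [hrows]
  · simp only [if_neg hrows]
    set names := PySem.Set.ofList (ntp.map Prod.fst) with hnames
    set n := pvMaxLen rows with hn
    obtain ⟨r0, rt, hr⟩ : ∃ r0 rt, rows = r0 :: rt := by
      cases rows with
      | nil => exact absurd rfl hrows
      | cons a b => exact ⟨a, b, rfl⟩
    have hn0 : 0 ≤ n := by
      rw [hn, pvMaxLen, hr, List.map_cons, PySem.List.max?_id_cons, Option.getD_some]
      have h1 := (PySem.List.le_foldl_max (rt.map (fun r => ((r.length : Int)))) ((r0.length : Int))).1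
      have h0 : (0 : Int) ≤ (r0.length : Int) := Int.natCast_nonneg _
      omega
    by_cases hzero : n = 0
    · rw [hzero, if_pos rfl, PySem.List.pyRange_one_eq_nil (le_refl 0), List.foldl_nil]
    · rw [if_neg hzero]
      set N := n.toNat with hNdef
      have hN : ((N : Nat) : Int) = n := Int.toNat_of_nonneg hn0
      have hNpos : 0 < N := by omega
      set H : Int → Int := fun c => ((rows.countP (fun r => pvHitAt names r c.toNat) : Nat) : Int)
        with hH
      -- A's inline per-column sum equals the hit count H c
      have hhits : ∀ c : Int, 0 ≤ c →
          (rows.foldl (fun acc r =>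
            if c < (r.length : Int) ∧
               (PySem.Set.contains names (PySem.Str.strip
                 (let v := PySem.List.pyGetD r c ""; if v = "" then "" else v)) = true)
            then acc + 1 else acc) 0) = H c := by
        intro c hc
        rw [PySem.List.foldl_ite_add_one, zero_add, hH]
        congr 1
        apply List.countP_congr
        intro r _
        by_cases hlt : c < (r.length : Int)
        · have hct : c.toNat < r.length := by omega
          simp only [decide_eq_true_eq, hlt, true_and,
            PySem.List.pyGetD_eq_getElem r "" hc hlt, pv_or_empty, pvHitAt,
            List.getElem?_eq_getElem hct, pvCond]
        · have hct : r.length ≤ c.toNat := by omega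
          simp only [decide_eq_true_eq, hlt, false_and, pvHitAt,
            List.getElem?_eq_none hct]
          simp
      -- rewrite A's range fold to use H
      have hAfold : (PySem.List.pyRange 0 n 1).foldl (fun (st : Int × Int) c =>
            let hits : Int := rows.foldl (fun acc r =>
              if c < (r.length : Int) ∧
                 (PySem.Set.contains names (PySem.Str.strip
                   (let v := PySem.List.pyGetD r c ""; if v = "" then "" else v)) = true)
              then acc + 1 else acc) 0
            if hits > st.2 then (c, hits) else st) ((0 : Int), (-1 : Int))
          = (PySem.List.pyRange 0 n 1).foldl
              (fun (st : Int × Int) c => if H c > st.2 then (c, H c) else st)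
              ((0 : Int), (-1 : Int)) := by
        apply PySem.List.foldl_congr_mem
        intro st c hc
        have hc' := (PySem.List.mem_pyRange_one.mp hc).1
        simp only [hhits c hc']
      rw [hAfold, ← hN, pv_range_fold_eq H N ((0 : Int), (-1 : Int)), pv_argmax_fold]
      -- B's counts list equals the list of hit counts per column
      have hcounts : rows.foldl (fun counts r =>
            (PySem.List.enumerate r).foldl (fun counts cv =>
              if PySem.Set.contains names (PySem.Str.strip cv.2) then
                counts.modify cv.1.toNat (· + 1) else counts) counts)
            (List.replicate n.toNat (0 : Int))
          = (PySem.List.pyRange 0 (N : Int) 1).map H := by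
        apply List.ext_getElem?
        intro k
        rw [pv_outer_getElem? names rows (List.replicate n.toNat 0) k]
        by_cases hk : k < N
        · rw [List.getElem?_replicate_of_lt (by omega), Option.map_some,
            PySem.List.getElem?_map_pyRange_zero H N k hk, hH]
          simp
        · rw [List.getElem?_eq_none (by simp [List.length_replicate]; omega),
            Option.map_none, Eq.comm, List.getElem?_eq_none]
          simp only [List.length_map, PySem.List.length_pyRange_one]
          omega
      rw [hcounts]
      -- counts is nonempty: peel its head
      have hcons : (PySem.List.pyRange 0 (N : Int) 1).map H
          = H 0 :: (PySem.List.pyRange 1 (N : Int) 1).map H := by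
        rw [PySem.List.pyRange_one_cons (by exact_mod_cast hNpos), List.map_cons]
        norm_num
      rw [hcons]
      have hH0 : (0 : Int) ≤ H 0 := by simp only [hH]; exact Int.natCast_nonneg _
      set ct := (PySem.List.pyRange 1 (N : Int) 1).map H with hctdef
      have hfold2 : (H 0 :: ct).foldl max (-1) = ct.foldl max (H 0) := by
        rw [List.foldl_cons, max_eq_right (by omega : (-1 : Int) ≤ H 0)]
      have hMpos : (H 0 :: ct).foldl max (-1) > -1 := by
        rw [hfold2]
        have := (PySem.List.le_foldl_max ct (H 0)).1
        omega
      rw [if_pos hMpos, hfold2, PySem.List.max?_id_cons]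
      simp
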